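-- pv_equiv track=rewrite | github.com/BackofenLab/AxoWise | build_graph_db.py | decode_evidence_scores
-- ===== SOURCE A (Python) =====
-- def decode_evidence_scores(evidence_scores):
--     """
--     Decodes evidence scores field from STRING by mapping
--     channel IDs from STRING to the channel names.
--     """
--
--     score_channel_map = {
--         6: "coexpression",
--         8: "experiments",
--         10: "database",
--         12: "textmining",
--         14: "neighborhood",
--         15: "fusion",
--         16: "cooccurence"
--     }
--
--     params = {
--         channel: None for channel in score_channel_map.values()
--     }
--     for score_id, score in evidence_scores:
--         if score_id not in score_channel_map:
--             continue
--
--         score_type = score_channel_map[score_id]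
--         params[score_type] = score
--     return params
-- ===== SOURCE B (Python) =====
-- def decode_evidence_scores(evidence_scores):
--     """
--     Decodes evidence scores field from STRING by mapping
--     channel IDs from STRING to the channel names.
--     """
--
--     score_channel_map = {
--         6: "coexpression",
--         8: "experiments",
--         10: "database",
--         12: "textmining",
--         14: "neighborhood",
--         15: "fusion",
--         16: "cooccurence"
--     }
--
--     lookup = dict(evidence_scores)
--     return {name: lookup.get(cid) for cid, name in score_channel_map.items()}
-- ===== Notes on version B (the rewrite author's own statement) =====
-- stated objective: idiomatic
-- what changed: Instead of initialising all fields to None and scanning the input assigning into them, B builds a lookup dict from the input once and projects the fixed channel map through it in a single comprehension (the fixed map drives the loop, not the input).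
import Mathlib
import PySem

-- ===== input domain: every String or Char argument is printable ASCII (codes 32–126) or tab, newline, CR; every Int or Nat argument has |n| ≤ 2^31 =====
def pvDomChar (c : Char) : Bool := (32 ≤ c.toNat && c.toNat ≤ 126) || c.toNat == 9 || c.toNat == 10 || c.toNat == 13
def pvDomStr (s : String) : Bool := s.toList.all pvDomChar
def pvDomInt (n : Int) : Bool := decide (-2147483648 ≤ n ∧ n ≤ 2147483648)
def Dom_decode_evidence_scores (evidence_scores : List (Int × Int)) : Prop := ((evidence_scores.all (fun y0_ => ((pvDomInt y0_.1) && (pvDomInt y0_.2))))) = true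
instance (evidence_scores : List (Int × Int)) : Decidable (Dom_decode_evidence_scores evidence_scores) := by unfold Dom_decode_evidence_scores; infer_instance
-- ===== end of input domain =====

-- B builds a lookup dict from the input once and projects the fixed channel map through it,
-- instead of A's scan-and-assign into a None-initialised params dict (idiomatic; same cost).


-- ===== PORT A =====
-- score_channel_map, the fixed dict literal both Pythons write out (shared constant of the two ports)
def pvScmA : PySem.Dict Int String :=
  PySem.Dict.ofList [(6, "coexpression"), (8, "experiments"), (10, "database"),
                     (12, "textmining"), (14, "neighborhood"), (15, "fusion"), (16, "cooccurence")]

def decode_evidence_scores (evidence_scores : List (Int × Int)) : List (String × Option Int) :=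
  -- params = {channel: None for channel in score_channel_map.values()}
  let params0 : PySem.Dict String (Option Int) :=
    PySem.Dict.ofList (pvScmA.values.map (fun channel => (channel, none)))
  -- for score_id, score in evidence_scores: if score_id not in map: continue; params[map[score_id]] = score
  let params := evidence_scores.foldl (fun params p =>
    match pvScmA.get? p.1 with
    | none => params                      -- score_id not in score_channel_map: continue
    | some score_type => params.insert score_type (some p.2)) params0
  params.items

-- ===== PORT B =====
def decode_evidence_scores_alt (evidence_scores : List (Int × Int)) : List (String × Option Int) :=
  -- lookup = dict(evidence_scores)
  let lookup : PySem.Dict Int Int := PySem.Dict.ofList evidence_scores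
  -- {name: lookup.get(cid) for cid, name in score_channel_map.items()}
  pvScmA.items.map (fun p => (p.2, lookup.get? p.1))

-- ===== PRECONDITION & SPEC =====
def Spec_decode_evidence_scores (evidence_scores : List (Int × Int)) (out : List (String × Option Int)) : Prop := out = decode_evidence_scores_alt evidence_scores
instance (evidence_scores : List (Int × Int)) (out : List (String × Option Int)) : Decidable (Spec_decode_evidence_scores evidence_scores out) := by unfold Spec_decode_evidence_scores; infer_instance

-- ===== CLAIM (what is proved, stated in full; the proofs are below) =====
def Claim_equal_decode_evidence_scores : Prop := ∀ (evidence_scores : List (Int × Int)), Dom_decode_evidence_scores evidence_scores → Spec_decode_evidence_scores evidence_scores (decode_evidence_scores evidence_scores)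

-- ===== LEMMAS AND PROOFS =====

-- A's params dict, expressed as the channel map projected through an id → score lookup L
def pvProj (L : PySem.Dict Int Int) : PySem.Dict String (Option Int) :=
  PySem.Dict.mk (pvScmA.items.map (fun p => (p.2, L.get? p.1)))

-- one step of A's loop on a projected state = projecting the updated lookup
theorem pvStep (L : PySem.Dict Int Int) (sid s : Int) :
    (match pvScmA.get? sid with
     | none => pvProj L
     | some score_type => (pvProj L).insert score_type (some s)) =
    pvProj (L.insert sid s) := by
  have hmk : pvScmA = PySem.Dict.mk [(6, "coexpression"), (8, "experiments"), (10, "database"),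
                     (12, "textmining"), (14, "neighborhood"), (15, "fusion"), (16, "cooccurence")] := by decide
  have hg : pvScmA.get? sid =
      (if (6 : Int) = sid then some "coexpression" else if (8 : Int) = sid then some "experiments"
       else if (10 : Int) = sid then some "database" else if (12 : Int) = sid then some "textmining"
       else if (14 : Int) = sid then some "neighborhood" else if (15 : Int) = sid then some "fusion"
       else if (16 : Int) = sid then some "cooccurence" else none) := by
    simp only [hmk, PySem.Dict.get?, List.find?]
    repeat' split <;> simp_all
  rw [hg]
  have hR : ∀ c : Int, (L.insert sid s).get? c = if c = sid then some s else L.get? c :=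
    fun c => PySem.Dict.get?_insert L sid c s
  split_ifs with h1 h2 h3 h4 h5 h6 h7
  · subst h1; simp only [pvProj, hmk]; simp only [hR]; simp [PySem.Dict.insert]
  · subst h2; simp only [pvProj, hmk]; simp only [hR]; simp [PySem.Dict.insert]
  · subst h3; simp only [pvProj, hmk]; simp only [hR]; simp [PySem.Dict.insert]
  · subst h4; simp only [pvProj, hmk]; simp only [hR]; simp [PySem.Dict.insert]
  · subst h5; simp only [pvProj, hmk]; simp only [hR]; simp [PySem.Dict.insert]
  · subst h6; simp only [pvProj, hmk]; simp only [hR]; simp [PySem.Dict.insert]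
  · subst h7; simp only [pvProj, hmk]; simp only [hR]; simp [PySem.Dict.insert]
  · simp only [pvProj, hmk]; simp only [hR]; simp [h1, h2, h3, h4, h5, h6, h7]

theorem pvLoop (es : List (Int × Int)) (L : PySem.Dict Int Int) :
    es.foldl (fun params p =>
      match pvScmA.get? p.1 with
      | none => params
      | some score_type => params.insert score_type (some p.2)) (pvProj L) =
    pvProj (es.foldl (fun d p => d.insert p.1 p.2) L) := by
  induction es generalizing L with
  | nil => rfl
  | cons p t ih => simpa [pvStep L p.1 p.2] using ih (L.insert p.1 p.2)

-- ===== VERDICT (by name: the statement is the Claim_ definition above) =====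
theorem decode_evidence_scores_spec : Claim_equal_decode_evidence_scores := by
  intro es _
  unfold Spec_decode_evidence_scores decode_evidence_scores decode_evidence_scores_alt
  have h0 : PySem.Dict.ofList ((pvScmA.values).map (fun channel => ((channel : String), (none : Option Int)))) =
      pvProj PySem.Dict.empty := by decide
  simp only [h0, pvLoop es PySem.Dict.empty]
  rfl
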